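-- pv_equiv track=rewrite | github.com/steina1989/bioinformatics | bioutils.py | most_frequent_approx_kmer
-- ===== SOURCE A (Python) =====
-- import collections
-- import itertools as it
--
-- def most_frequent_approx_kmer(dna: str, k: int, d: int) -> set:
--     """ Returns the set of the most frequent approximate kmers in a dna string that
--     have a hamming distance of at most d from any kmer in the dna.
--     doctest:
--     >>> dna = 'ACGTTGCATGTCGCATGATGCATGAGAGCT'
--     >>> sorted(most_frequent_approx_kmer(dna,4,1))
--     ['ATGC', 'ATGT', 'GATG']
--     """
--     occurrence_dict = collections.defaultdict(int)
--     for kmer in iter_substr(dna, k):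
--         for product in it.product("ACGT", repeat=k):
--             dist = hamming_distance(kmer, product)
--             if dist <= d:
--                 occurrence_dict["".join(product)] += 1
--
--     max_freq = max(occurrence_dict.values())
--     return {kmer for kmer, count in occurrence_dict.items() if count == max_freq}
--
-- def hamming_distance(a: str, b: str) -> int:
--     """ Returns the hamming distance of two strings
--
--     doctest:
--     >>> hamming_distance('GGGCCGTTGGT','GGACCGTTGAC')
--     3
--     """
--     if len(a) != len(b):
--         raise ValueError("Strings a,b must be of equal length")
--     dist = 0
--     for i in range(len(a)):
--         if a[i] != b[i]:
--             dist += 1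
--     return dist
--
-- def iter_substr(dna: str, k: int):
--     """ Returns a generator that produces all kmers in a dna string.
--     Or more generally, all substrings of length k in a string.
--
--     doctest:
--     >>> list(iter_substr("abcdefg",3))
--     ['abc', 'bcd', 'cde', 'def', 'efg']
--     """
--     for i in range(len(dna) - k + 1):
--         yield dna[i : i + k]
-- ===== SOURCE B (Python) =====
-- def most_frequent_approx_kmer(dna: str, k: int, d: int) -> set:
--     """Most frequent ACGT k-mers within Hamming distance d of some k-mer of dna.
--     Instead of scanning all 4**k candidate strings per window, enumerate only the
--     d-neighborhood (over the ACGT alphabet) of each observed k-mer and count in a dict."""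
--     counts = {}
--     for i in range(len(dna) - k + 1):
--         kmer = dna[i:i + k]
--         for nb in _acgt_neighbors(kmer, d):
--             counts[nb] = counts.get(nb, 0) + 1
--     max_freq = max(counts.values())
--     return {s for s, c in counts.items() if c == max_freq}
--
-- def _acgt_neighbors(kmer: str, budget: int) -> list:
--     """All ACGT strings within Hamming distance `budget` of kmer, in lexicographic order."""
--     if not kmer:
--         return [''] if budget >= 0 else []
--     first, rest = kmer[0], kmer[1:]
--     out = []
--     for c in "ACGT":
--         cost = 0 if c == first else 1
--         if cost <= budget:
--             out.extend(c + t for t in _acgt_neighbors(rest, budget - cost))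
--     return out
-- ===== Notes on version B (the rewrite author's own statement) =====
-- stated objective: alternative
-- what changed: Instead of testing every one of the 4^k candidate ACGT strings against each window, B recursively enumerates the d-neighborhood (ACGT strings within Hamming distance d, generated in lexicographic order with budget pruning) of each observed k-mer and counts those in a dict; when d is large the neighborhood approaches all 4^k strings, so B trades the nested candidate scan for recursive enumeration rather than guaranteeing speed.
import Mathlib
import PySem

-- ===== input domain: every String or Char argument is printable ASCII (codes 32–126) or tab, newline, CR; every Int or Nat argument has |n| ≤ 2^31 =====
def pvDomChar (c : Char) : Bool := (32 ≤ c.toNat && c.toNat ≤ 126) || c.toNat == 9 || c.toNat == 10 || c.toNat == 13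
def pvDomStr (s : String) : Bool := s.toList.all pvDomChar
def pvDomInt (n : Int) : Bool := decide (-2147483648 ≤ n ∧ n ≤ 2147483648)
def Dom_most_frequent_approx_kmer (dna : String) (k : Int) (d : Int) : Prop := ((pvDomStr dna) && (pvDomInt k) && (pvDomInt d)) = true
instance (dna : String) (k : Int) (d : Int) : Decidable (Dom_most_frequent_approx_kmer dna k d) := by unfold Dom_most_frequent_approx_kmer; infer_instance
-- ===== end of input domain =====

-- B replaces A's scan of all 4^k candidate ACGT strings per window by enumerating the d-neighborhood
-- of each observed k-mer (in lexicographic order, with budget pruning): objective = alternative.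
-- Python A returns a set; per the type convention both ports return its distinct elements as a list.


-- ===== PORT A =====
-- it.product("ACGT", repeat=k): all length-k ACGT tuples, first coordinate varying slowest
def pyProductACGT : Nat → List (List Char)
  | 0 => [[]]
  | n + 1 => (['A', 'C', 'G', 'T'] : List Char).flatMap (fun c => (pyProductACGT n).map (fun p => c :: p))

-- hamming_distance: index loop over range(len(a)); none = the ValueError raised on unequal lengths
def pyHammingDistance (a b : List Char) : Option Int :=
  if a.length ≠ b.length then none
  else some ((List.range a.length).foldl
    (fun dist i => if a.getD i ' ' ≠ b.getD i ' ' then dist + 1 else dist) (0 : Int))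

def most_frequent_approx_kmer (dna : String) (k : Int) (d : Int) : List String :=
  let chars := dna.toList
  -- for kmer in iter_substr(dna, k): for product in it.product("ACGT", repeat=k): …
  -- Option.elim on the hamming result: the `none` (= Python's ValueError) branch keeps the dict
  -- unchanged; it is unreachable for inputs admitted by Pre_ below.
  let occurrence_dict :=
    (PySem.List.pyRange 0 ((chars.length : Int) - k + 1) 1).foldl (fun dict i =>
      let kmer := PySem.List.slice chars (some i) (some (i + k))
      (pyProductACGT k.toNat).foldl (fun dict p =>
        (pyHammingDistance kmer p).elim dict (fun dist =>
          if dist ≤ d then dict.modify (String.ofList p) 0 (· + 1) else dict)) dict)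
      (PySem.Dict.empty : PySem.Dict String Int)
  -- max(occurrence_dict.values()); none (= Python's ValueError on an empty dict) is excluded by Pre_
  (PySem.List.max? occurrence_dict.values (fun v => v)).elim [] (fun max_freq =>
      PySem.Set.ofList ((occurrence_dict.items.filter (fun kv => kv.2 == max_freq)).map (fun kv => kv.1)))

-- ===== PORT B =====
-- _acgt_neighbors(kmer, budget): ACGT strings within Hamming distance budget, lexicographic order
def pvAcgtNeighbors (kmer : List Char) (budget : Int) : List (List Char) :=
  match kmer with
  | [] => if 0 ≤ budget then [[]] else []
  | first :: rest =>
      (['A', 'C', 'G', 'T'] : List Char).foldl (fun out c =>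
        let cost : Int := if c = first then 0 else 1
        if cost ≤ budget then out ++ (pvAcgtNeighbors rest (budget - cost)).map (fun t => c :: t)
        else out) []

def most_frequent_approx_kmer_alt (dna : String) (k : Int) (d : Int) : List String :=
  let chars := dna.toList
  let counts :=
    (PySem.List.pyRange 0 ((chars.length : Int) - k + 1) 1).foldl (fun counts i =>
      let kmer := PySem.List.slice chars (some i) (some (i + k))
      (pvAcgtNeighbors kmer d).foldl (fun counts nb =>
        counts.insert (String.ofList nb) (counts.getD (String.ofList nb) 0 + 1)) counts)
      (PySem.Dict.empty : PySem.Dict String Int)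
  -- max(counts.values()); none (= Python's ValueError on an empty dict) is excluded by Pre_
  (PySem.List.max? counts.values (fun v => v)).elim [] (fun max_freq =>
      PySem.Set.ofList ((counts.items.filter (fun kv => kv.2 == max_freq)).map (fun kv => kv.1)))

-- ===== PRECONDITION & SPEC =====
-- Pre_ excludes exactly the inputs on which Python A raises: k < 0 (it.product raises ValueError on a
-- negative repeat) and the cases where the occurrence dict stays empty — k > len(dna), or no length-k
-- window of dna within Hamming distance d of an ACGT string (i.e. every window has more than d
-- non-ACGT characters, which also covers d < 0) — where max() raises ValueError.
def Pre_most_frequent_approx_kmer (dna : String) (k : Int) (d : Int) : Prop :=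
  0 ≤ k ∧ k ≤ (dna.toList.length : Int) ∧
  ∃ i ∈ List.range (dna.toList.length - k.toNat + 1),
    ((((dna.toList.drop i).take k.toNat).countP (fun c => c ∉ (['A', 'C', 'G', 'T'] : List Char)) : Int) ≤ d)
instance (dna : String) (k : Int) (d : Int) : Decidable (Pre_most_frequent_approx_kmer dna k d) := by
  unfold Pre_most_frequent_approx_kmer; infer_instance

def pvWitness_most_frequent_approx_kmer : String × Int × Int := ("ACGT", 2, 1)

def Spec_most_frequent_approx_kmer (dna : String) (k : Int) (d : Int) (out : List String) : Prop := out = most_frequent_approx_kmer_alt dna k d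
instance (dna : String) (k : Int) (d : Int) (out : List String) : Decidable (Spec_most_frequent_approx_kmer dna k d out) := by unfold Spec_most_frequent_approx_kmer; infer_instance

-- ===== CLAIM (what is proved, stated in full; the proofs are below) =====
def Claim_equal_most_frequent_approx_kmer : Prop := ∀ (dna : String) (k : Int) (d : Int), Dom_most_frequent_approx_kmer dna k d → Pre_most_frequent_approx_kmer dna k d → Spec_most_frequent_approx_kmer dna k d (most_frequent_approx_kmer dna k d)

-- ===== LEMMAS AND PROOFS =====

-- recursive Hamming distance on equal-length lists (proof-side characterisation of A's index loop)
def pvHr : List Char → List Char → Int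
  | a :: as, b :: bs => (if a ≠ b then 1 else 0) + pvHr as bs
  | _, _ => 0

theorem pvHr_nonneg : ∀ (a b : List Char), 0 ≤ pvHr a b := by
  intro a
  induction a with
  | nil => intro b; simp [pvHr]
  | cons x xs ih =>
      intro b
      cases b with
      | nil => simp [pvHr]
      | cons y ys => have := ih ys; simp only [pvHr]; split <;> omega

theorem pvHamming_foldl (a : List Char) : ∀ (b : List Char) (s : Int), a.length = b.length →
    (List.range a.length).foldl
      (fun dist i => if a.getD i ' ' ≠ b.getD i ' ' then dist + 1 else dist) s
    = s + pvHr a b := by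
  induction a with
  | nil => intro b s h; cases b <;> simp_all [pvHr]
  | cons x xs ih =>
      intro b s h
      cases b with
      | nil => simp at h
      | cons y ys =>
        simp only [List.length_cons, List.range_succ_eq_map, List.foldl_cons, List.foldl_map,
          List.getD_cons_zero, List.getD_cons_succ]
        have h' : xs.length = ys.length := by simpa using h
        rw [ih ys _ h']
        simp only [pvHr]
        split <;> omega

theorem pvHamming_eq (a b : List Char) (h : a.length = b.length) :
    pyHammingDistance a b = some (pvHr a b) := by
  unfold pyHammingDistance
  rw [if_neg (by omega), pvHamming_foldl a b 0 h]
  simp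

theorem length_mem_pyProduct : ∀ (n : Nat) (p : List Char), p ∈ pyProductACGT n → p.length = n := by
  intro n
  induction n with
  | zero => intro p hp; simp [pyProductACGT] at hp; simp [hp]
  | succ m ih =>
      intro p hp
      simp only [pyProductACGT, List.mem_flatMap, List.mem_map] at hp
      obtain ⟨c, _, q, hq, rfl⟩ := hp
      simp [ih q hq]

-- B's neighborhood enumeration IS A's lexicographic product list filtered by Hamming distance ≤ d
theorem pvNeighbors_eq : ∀ (kmer : List Char) (d : Int),
    pvAcgtNeighbors kmer d = (pyProductACGT kmer.length).filter (fun p => decide (pvHr kmer p ≤ d)) := by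
  intro kmer
  induction kmer with
  | nil =>
      intro d
      by_cases h : (0 : Int) ≤ d <;> simp [pvAcgtNeighbors, pyProductACGT, pvHr, h]
  | cons x xs ih =>
      intro d
      rw [pvAcgtNeighbors]
      rw [show (fun (out : List (List Char)) (c : Char) =>
            let cost : Int := if c = x then 0 else 1
            if cost ≤ d then out ++ (pvAcgtNeighbors xs (d - cost)).map (fun t => c :: t) else out)
          = (fun out c => out ++ (if (if c = x then (0 : Int) else 1) ≤ d then
              (pvAcgtNeighbors xs (d - (if c = x then (0 : Int) else 1))).map (fun t => c :: t)
            else [])) from by funext out c; dsimp only; split_ifs <;> simp]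
      rw [PySem.List.foldl_append_eq_flatMap]
      simp only [List.nil_append, List.length_cons]
      rw [show pyProductACGT (xs.length + 1)
          = (['A','C','G','T'] : List Char).flatMap (fun c => (pyProductACGT xs.length).map (fun p => c :: p)) from rfl]
      rw [List.filter_flatMap]
      apply List.flatMap_congr
      intro c _
      rw [List.filter_map]
      by_cases hcd : (if c = x then (0:Int) else 1) ≤ d
      · rw [if_pos hcd, ih (d - (if c = x then (0:Int) else 1))]
        congr 1
        apply List.filter_congr
        intro q _
        simp only [Function.comp, pvHr]
        apply decide_eq_decide.mpr
        split_ifs <;> first | omega | (exfalso; simp_all)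
      · rw [if_neg hcd]
        symm
        rw [List.map_eq_nil_iff, List.filter_eq_nil_iff]
        intro q _
        have h0 := pvHr_nonneg xs q
        simp only [Function.comp, pvHr, decide_eq_true_eq]
        split_ifs at hcd ⊢ <;> first | omega | (exfalso; simp_all)

-- inner loops agree: A's full product scan counts exactly B's neighbors, in the same dict order
theorem pvInner_eq (kmer : List Char) (m : Nat) (hk : kmer.length = m) (d : Int)
    (dict : PySem.Dict String Int) :
    (pyProductACGT m).foldl (fun dict p =>
      (pyHammingDistance kmer p).elim dict (fun dist =>
        if dist ≤ d then dict.modify (String.ofList p) 0 (· + 1) else dict)) dict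
    = (pvAcgtNeighbors kmer d).foldl (fun dict nb =>
        dict.insert (String.ofList nb) (dict.getD (String.ofList nb) 0 + 1)) dict := by
  subst hk
  have h1 := PySem.List.foldl_congr_mem (pyProductACGT kmer.length)
    (fun dict p =>
      (pyHammingDistance kmer p).elim dict (fun dist =>
        if dist ≤ d then dict.modify (String.ofList p) 0 (· + 1) else dict))
    (fun dict p =>
      if pvHr kmer p ≤ d then dict.insert (String.ofList p) (dict.getD (String.ofList p) 0 + 1)
      else dict) dict
    (by intro acc p hp
        beta_reduce
        rw [pvHamming_eq kmer p (by rw [length_mem_pyProduct _ p hp])]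
        rfl)
  rw [h1, PySem.List.foldl_ite_eq_foldl_filter, pvNeighbors_eq]

theorem pvSlice_length (chars : List Char) (i k : Int) (h0 : 0 ≤ i) (hk : 0 ≤ k)
    (hle : i + k ≤ (chars.length : Int)) :
    (PySem.List.slice chars (some i) (some (i + k))).length = k.toNat := by
  rw [PySem.List.slice_toNat chars h0 (by omega)]
  simp only [List.length_take, List.length_drop]
  omega

theorem main_eq (dna : String) (k : Int) (d : Int) (hk0 : 0 ≤ k) :
    most_frequent_approx_kmer dna k d = most_frequent_approx_kmer_alt dna k d := by
  have hdict : (PySem.List.pyRange 0 ((dna.toList.length : Int) - k + 1) 1).foldl (fun dict i =>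
      (pyProductACGT k.toNat).foldl (fun dict p =>
        (pyHammingDistance (PySem.List.slice dna.toList (some i) (some (i + k))) p).elim dict (fun dist =>
          if dist ≤ d then dict.modify (String.ofList p) 0 (· + 1) else dict)) dict)
      (PySem.Dict.empty : PySem.Dict String Int)
    = (PySem.List.pyRange 0 ((dna.toList.length : Int) - k + 1) 1).foldl (fun counts i =>
      (pvAcgtNeighbors (PySem.List.slice dna.toList (some i) (some (i + k))) d).foldl (fun counts nb =>
        counts.insert (String.ofList nb) (counts.getD (String.ofList nb) 0 + 1)) counts)
      (PySem.Dict.empty : PySem.Dict String Int) := by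
    apply PySem.List.foldl_congr_mem
    intro acc i hi
    have hmem := (PySem.List.mem_pyRange_one).mp hi
    exact pvInner_eq _ k.toNat (by
      rw [pvSlice_length dna.toList i k (by omega) hk0 (by omega)]) d acc
  exact congrArg (fun dct : PySem.Dict String Int =>
    (PySem.List.max? dct.values (fun v => v)).elim [] (fun max_freq =>
      PySem.Set.ofList ((dct.items.filter (fun kv : String × Int => kv.2 == max_freq)).map
        (fun kv : String × Int => kv.1)))) hdict

-- ===== VERDICT (by name: the statement is the Claim_ definition above) =====
theorem most_frequent_approx_kmer_spec : Claim_equal_most_frequent_approx_kmer := by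
  intro dna k d _ hpre
  unfold Spec_most_frequent_approx_kmer
  exact main_eq dna k d hpre.1
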